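-- pv_equiv track=rewrite | github.com/iMMIQ/nnc-py | src/nnc_py/passes/memory_planning.py | _find_region_offset
-- ===== SOURCE A (Python) =====
-- _DEFAULT_ALIGNMENT = 16
--
-- def _find_region_offset(
--     region_name: str,
--     aligned_region_size: int,
--     placed_region_offsets: dict[str, int],
--     per_node_region_sizes: list[dict[str, int]],
-- ) -> int:
--     candidate_offsets = {0}
--
--     if per_node_region_sizes:
--         for node_region_sizes in per_node_region_sizes:
--             for placed_region_name, placed_offset in placed_region_offsets.items():
--                 placed_size = _align(
--                     node_region_sizes.get(placed_region_name, 0),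
--                     _DEFAULT_ALIGNMENT,
--                 )
--                 if placed_size > 0:
--                     candidate_offsets.add(placed_offset + placed_size)
--     else:
--         for placed_offset in placed_region_offsets.values():
--             candidate_offsets.add(placed_offset)
--
--     for candidate_offset in sorted(candidate_offsets):
--         if _region_offset_is_valid(
--             region_name,
--             candidate_offset,
--             aligned_region_size,
--             placed_region_offsets,
--             per_node_region_sizes,
--         ):
--             return candidate_offset
--
--     if not placed_region_offsets:
--         return 0
--     return max(placed_region_offsets.values()) + aligned_region_size
--
-- def _region_offset_is_valid(
--     region_name: str,
--     candidate_offset: int,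
--     aligned_region_size: int,
--     placed_region_offsets: dict[str, int],
--     per_node_region_sizes: list[dict[str, int]],
-- ) -> bool:
--     if not per_node_region_sizes:
--         return True
--
--     for node_region_sizes in per_node_region_sizes:
--         candidate_size = _align(node_region_sizes.get(region_name, 0), _DEFAULT_ALIGNMENT)
--         if candidate_size <= 0:
--             continue
--         candidate_end = candidate_offset + candidate_size
--
--         for placed_region_name, placed_offset in placed_region_offsets.items():
--             placed_size = _align(
--                 node_region_sizes.get(placed_region_name, 0),
--                 _DEFAULT_ALIGNMENT,
--             )
--             if placed_size <= 0:
--                 continue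
--             placed_end = placed_offset + placed_size
--             if candidate_offset < placed_end and placed_offset < candidate_end:
--                 return False
--
--         if candidate_offset + aligned_region_size < candidate_end:
--             return False
--
--     return True
--
-- def _align(value: int, alignment: int) -> int:
--     if value <= 0:
--         return 0
--     return ((value + alignment - 1) // alignment) * alignment
-- ===== SOURCE B (Python) =====
-- _DEFAULT_ALIGNMENT = 16
--
--
-- def _align_up(value):
--     if value <= 0:
--         return 0
--     return -(-value // _DEFAULT_ALIGNMENT) * _DEFAULT_ALIGNMENT
--
--
-- def _merge_intervals(intervals):
--     """Merge open intervals sorted by start into a start-sorted list covering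
--     the same integer points."""
--     if not intervals:
--         return []
--     merged = []
--     lo, hi = intervals[0]
--     for nlo, nhi in intervals[1:]:
--         if nlo < hi:
--             hi = max(hi, nhi)
--         else:
--             merged.append((lo, hi))
--             lo, hi = nlo, nhi
--     merged.append((lo, hi))
--     return merged
--
--
-- def _find_region_offset(
--     region_name,
--     aligned_region_size,
--     placed_region_offsets,
--     per_node_region_sizes,
-- ):
--     offsets = list(placed_region_offsets.values())
--     if not per_node_region_sizes:
--         return min([0] + offsets)
--
--     candidates = {0}
--     forbidden = []
--     feasible = True
--     for node_region_sizes in per_node_region_sizes: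
--         own_size = _align_up(node_region_sizes.get(region_name, 0))
--         if own_size > 0 and own_size > aligned_region_size:
--             feasible = False
--         for placed_name, placed_offset in placed_region_offsets.items():
--             placed_size = _align_up(node_region_sizes.get(placed_name, 0))
--             if placed_size > 0:
--                 candidates.add(placed_offset + placed_size)
--                 if own_size > 0:
--                     forbidden.append(
--                         (placed_offset - own_size, placed_offset + placed_size)
--                     )
--
--     if feasible:
--         merged = _merge_intervals(sorted(forbidden, key=lambda iv: iv[0]))
--         i = 0
--         for c in sorted(candidates):
--             while i < len(merged) and merged[i][1] <= c:
--                 i += 1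
--             if i == len(merged) or c <= merged[i][0]:
--                 return c
--
--     return max(offsets) + aligned_region_size if offsets else 0
-- ===== Notes on version B (the rewrite author's own statement) =====
-- stated objective: alternative
-- what changed: Instead of re-validating every sorted candidate with nested per-node/per-region dict scans, B makes one pass over the nodes to collect candidate offsets, a feasibility flag and the forbidden open intervals (placed_offset - own_size, placed_end), merges the start-sorted intervals, and finds the first free candidate with a single two-pointer sweep over the sorted candidates and merged intervals.
import Mathlib
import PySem

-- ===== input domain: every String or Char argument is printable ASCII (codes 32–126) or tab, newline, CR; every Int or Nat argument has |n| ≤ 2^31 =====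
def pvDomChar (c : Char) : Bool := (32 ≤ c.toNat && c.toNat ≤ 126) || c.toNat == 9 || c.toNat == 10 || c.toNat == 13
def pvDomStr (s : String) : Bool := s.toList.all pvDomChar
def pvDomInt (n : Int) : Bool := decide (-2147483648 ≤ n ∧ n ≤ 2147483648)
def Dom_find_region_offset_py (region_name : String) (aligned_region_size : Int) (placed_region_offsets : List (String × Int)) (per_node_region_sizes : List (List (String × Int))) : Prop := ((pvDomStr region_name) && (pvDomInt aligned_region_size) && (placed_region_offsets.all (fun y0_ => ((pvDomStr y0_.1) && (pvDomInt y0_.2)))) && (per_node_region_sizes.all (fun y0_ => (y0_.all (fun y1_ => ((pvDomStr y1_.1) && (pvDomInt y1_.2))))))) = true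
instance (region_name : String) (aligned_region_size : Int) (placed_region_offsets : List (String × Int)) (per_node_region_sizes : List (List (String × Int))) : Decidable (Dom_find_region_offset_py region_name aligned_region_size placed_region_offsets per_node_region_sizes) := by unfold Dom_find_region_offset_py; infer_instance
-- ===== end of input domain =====

-- ===== PORT A =====
-- B computes the same result by building the forbidden overlap intervals once, merging them,
-- and sweeping the sorted candidates, instead of A's per-candidate nested revalidation scans.

-- _align(value, alignment)
def pyAlign (value alignment : Int) : Int :=
  if value ≤ 0 then 0
  else PySem.Int.floordiv (value + alignment - 1) alignment * alignment

-- body of the per-node loop of _region_offset_is_valid (its early 'return False' = List.all)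
def nodeValidA (region_name : String) (c ars : Int) (placed : PySem.Dict String Int)
    (nodeL : List (String × Int)) : Bool :=
  let node := PySem.Dict.ofList nodeL
  let csize := pyAlign (node.getD region_name 0) 16
  if csize ≤ 0 then true
  else
    (placed.items.all (fun p =>
      let psize := pyAlign (node.getD p.1 0) 16
      if psize ≤ 0 then true
      else !(decide (c < p.2 + psize) && decide (p.2 < c + csize))))
    && !decide (c + ars < c + csize)

-- _region_offset_is_valid
def regionOffsetIsValid (region_name : String) (c ars : Int) (placed : PySem.Dict String Int)
    (nodes : List (List (String × Int))) : Bool :=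
  if nodes = [] then true
  else nodes.all (nodeValidA region_name c ars placed)

-- candidate_offsets.add(...) loop body for one node (the inner 'for ... in items()')
def candNodeA (placed : PySem.Dict String Int) (s : PySem.Set Int)
    (nodeL : List (String × Int)) : PySem.Set Int :=
  let node := PySem.Dict.ofList nodeL
  placed.items.foldl (fun s p =>
    let psize := pyAlign (node.getD p.1 0) 16
    if psize > 0 then PySem.Set.add s (p.2 + psize) else s) s

-- 'for candidate_offset in sorted(candidate_offsets): if valid: return candidate_offset'
def firstValidA (region_name : String) (ars : Int) (placed : PySem.Dict String Int)
    (nodes : List (List (String × Int))) : List Int → Option Int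
  | [] => none
  | c :: cs =>
    if regionOffsetIsValid region_name c ars placed nodes then some c
    else firstValidA region_name ars placed nodes cs

def find_region_offset_py (region_name : String) (aligned_region_size : Int) (placed_region_offsets : List (String × Int)) (per_node_region_sizes : List (List (String × Int))) : Int :=
  let placed := PySem.Dict.ofList placed_region_offsets
  let cands : PySem.Set Int :=
    if per_node_region_sizes = [] then
      placed.values.foldl (fun s v => PySem.Set.add s v) (PySem.Set.ofList [0])
    else
      per_node_region_sizes.foldl (candNodeA placed) (PySem.Set.ofList [0])
  match firstValidA region_name aligned_region_size placed per_node_region_sizes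
      (PySem.List.sorted cands (fun x => x) false) with
  | some c => c
  | none =>
    if placed.items = [] then 0
    else
      -- max() of the values list, nonempty here, so the none branch is unreachable
      match PySem.List.max? placed.values (fun x => x) with
      | some m => m + aligned_region_size
      | none => 0

-- ===== PORT B =====
-- _align_up
def alignUpB (value : Int) : Int :=
  if value ≤ 0 then 0
  else -(PySem.Int.floordiv (-value) 16) * 16

-- loop of _merge_intervals ('merged.append' emits a finished interval; (lo, hi) is the carried one)
def mergeLoopB (lo hi : Int) : List (Int × Int) → List (Int × Int)
  | [] => [(lo, hi)]
  | (nlo, nhi) :: rest =>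
    if nlo < hi then mergeLoopB lo (max hi nhi) rest
    else (lo, hi) :: mergeLoopB nlo nhi rest

-- _merge_intervals
def mergeIntervalsB : List (Int × Int) → List (Int × Int)
  | [] => []
  | (lo, hi) :: rest => mergeLoopB lo hi rest

-- the candidate sweep: 'for c in sorted(candidates)' with the persistent pointer i into merged
def sweepB : List Int → List (Int × Int) → Option Int
  | [], _ => none
  | c :: _, [] => some c
  | c :: cs, (lo, hi) :: ms =>
    if hi ≤ c then sweepB (c :: cs) ms
    else if c ≤ lo then some c
    else sweepB cs ((lo, hi) :: ms)
  termination_by cs ms => cs.length + ms.length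

-- one node of B's single scan over per_node_region_sizes; state = (candidates, forbidden, feasible)
def scanNodeB (region_name : String) (ars : Int) (placed : PySem.Dict String Int)
    (st : PySem.Set Int × List (Int × Int) × Bool) (nodeL : List (String × Int)) :
    PySem.Set Int × List (Int × Int) × Bool :=
  let node := PySem.Dict.ofList nodeL
  let own := alignUpB (node.getD region_name 0)
  let feas := if decide (own > 0) && decide (own > ars) then false else st.2.2
  placed.items.foldl (fun st p =>
    let psize := alignUpB (node.getD p.1 0)
    if psize > 0 then
      (PySem.Set.add st.1 (p.2 + psize),
       if own > 0 then st.2.1 ++ [(p.2 - own, p.2 + psize)] else st.2.1,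
       st.2.2)
    else st) (st.1, st.2.1, feas)

def find_region_offset_py_alt (region_name : String) (aligned_region_size : Int) (placed_region_offsets : List (String × Int)) (per_node_region_sizes : List (List (String × Int))) : Int :=
  let placed := PySem.Dict.ofList placed_region_offsets
  let offsets := placed.values
  if per_node_region_sizes = [] then
    match PySem.List.min? (0 :: offsets) (fun x => x) with
    | some m => m
    | none => 0
  else
    let st := per_node_region_sizes.foldl (scanNodeB region_name aligned_region_size placed)
      ((PySem.Set.ofList [0] : PySem.Set Int), ([] : List (Int × Int)), true)
    let res :=
      if st.2.2 then
        sweepB (PySem.List.sorted st.1 (fun x => x) false)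
          (mergeIntervalsB (PySem.List.sorted st.2.1 (fun iv => iv.1) false))
      else none
    match res with
    | some c => c
    | none =>
      if offsets = [] then 0
      else
        match PySem.List.max? offsets (fun x => x) with
        | some m => m + aligned_region_size
        | none => 0

-- ===== PRECONDITION & SPEC =====
def Spec_find_region_offset_py (region_name : String) (aligned_region_size : Int) (placed_region_offsets : List (String × Int)) (per_node_region_sizes : List (List (String × Int))) (out : Int) : Prop := out = find_region_offset_py_alt region_name aligned_region_size placed_region_offsets per_node_region_sizes
instance (region_name : String) (aligned_region_size : Int) (placed_region_offsets : List (String × Int)) (per_node_region_sizes : List (List (String × Int))) (out : Int) : Decidable (Spec_find_region_offset_py region_name aligned_region_size placed_region_offsets per_node_region_sizes out) := by unfold Spec_find_region_offset_py; infer_instance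

-- ===== CLAIM (what is proved, stated in full; the proofs are below) =====
def Claim_equal_find_region_offset_py : Prop := ∀ (region_name : String) (aligned_region_size : Int) (placed_region_offsets : List (String × Int)) (per_node_region_sizes : List (List (String × Int))), Dom_find_region_offset_py region_name aligned_region_size placed_region_offsets per_node_region_sizes → Spec_find_region_offset_py region_name aligned_region_size placed_region_offsets per_node_region_sizes (find_region_offset_py region_name aligned_region_size placed_region_offsets per_node_region_sizes)

-- ===== LEMMAS AND PROOFS =====

-- both alignments agree: ceil-by-floordiv vs negated floor of the negation
theorem align_eq (v : Int) : pyAlign v 16 = alignUpB v := by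
  unfold pyAlign alignUpB
  by_cases hv : v ≤ 0
  · simp [hv]
  · simp only [hv, if_false]
    have h2 : PySem.Int.floordiv (v + 16 - 1) 16 * 16 ≤ v + 16 - 1 ∧
        v + 16 - 1 < (PySem.Int.floordiv (v + 16 - 1) 16 + 1) * 16 :=
      (PySem.Int.floordiv_eq_iff_of_pos (by norm_num)).mp rfl
    have h3 : -(PySem.Int.floordiv (-v) 16) = PySem.Int.floordiv (v + 16 - 1) 16 :=
      (PySem.Int.neg_floordiv_neg_eq_iff_of_pos (by norm_num)).mpr (by omega)
    rw [← h3]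

-- proof-side vocabulary -------------------------------------------------------

-- 'candidate c avoids the forbidden open interval iv'
def okAtB (c : Int) (iv : Int × Int) : Bool := decide (c ≤ iv.1) || decide (iv.2 ≤ c)

-- reference scan: first candidate avoiding every interval of F
def firstGoodB (F : List (Int × Int)) : List Int → Option Int
  | [] => none
  | c :: cs => if F.all (okAtB c) then some c else firstGoodB F cs

-- the forbidden intervals one node contributes
def contribItems (own : Int) (node : PySem.Dict String Int) (items : List (String × Int)) :
    List (Int × Int) :=
  items.filterMap (fun p =>
    if alignUpB (node.getD p.1 0) > 0 then some (p.2 - own, p.2 + alignUpB (node.getD p.1 0))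
    else none)

def contribNode (region_name : String) (placed : PySem.Dict String Int)
    (nodeL : List (String × Int)) : List (Int × Int) :=
  let node := PySem.Dict.ofList nodeL
  let own := alignUpB (node.getD region_name 0)
  if own > 0 then contribItems own node placed.items else []

-- the candidate-independent per-node feasibility bit
def nodeOkB (region_name : String) (ars : Int) (nodeL : List (String × Int)) : Bool :=
  let own := alignUpB ((PySem.Dict.ofList nodeL).getD region_name 0)
  !(decide (own > 0) && decide (own > ars))

-- candNodeA with B's align
def candNodeB (placed : PySem.Dict String Int) (s : PySem.Set Int)
    (nodeL : List (String × Int)) : PySem.Set Int :=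
  let node := PySem.Dict.ofList nodeL
  placed.items.foldl (fun s p =>
    let psize := alignUpB (node.getD p.1 0)
    if psize > 0 then PySem.Set.add s (p.2 + psize) else s) s

theorem candNodeA_eq (placed : PySem.Dict String Int) :
    candNodeA placed = candNodeB placed := by
  funext s nodeL
  unfold candNodeA candNodeB
  simp only [align_eq]

-- B's inner items loop, unbundled ---------------------------------------------
theorem scan_inner_spec (node : PySem.Dict String Int) (own : Int)
    (items : List (String × Int)) (s : PySem.Set Int) (F : List (Int × Int)) (b : Bool) :
    items.foldl (fun st p =>
        let psize := alignUpB (node.getD p.1 0)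
        if psize > 0 then
          (PySem.Set.add st.1 (p.2 + psize),
           if own > 0 then st.2.1 ++ [(p.2 - own, p.2 + psize)] else st.2.1,
           st.2.2)
        else st) ((s, F, b) : PySem.Set Int × List (Int × Int) × Bool)
      = (items.foldl (fun s p =>
            let psize := alignUpB (node.getD p.1 0)
            if psize > 0 then PySem.Set.add s (p.2 + psize) else s) s,
         F ++ (if own > 0 then contribItems own node items else []), b) := by
  induction items generalizing s F with
  | nil => simp [contribItems]
  | cons p items ih =>
    simp only [List.foldl_cons]
    by_cases hp : alignUpB (node.getD p.1 0) > 0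
    · simp only [hp, if_true]
      rw [ih]
      simp only [contribItems, List.filterMap_cons, hp, if_true]
      by_cases ho : own > 0
      · simp [ho, List.append_assoc]
      · simp [ho]
    · simp only [hp, if_false]
      rw [ih]
      simp only [contribItems, List.filterMap_cons, hp, if_false]

-- B's whole scan, unbundled
theorem scan_spec (region_name : String) (ars : Int) (placed : PySem.Dict String Int)
    (nodes : List (List (String × Int))) (s : PySem.Set Int) (F : List (Int × Int)) (b : Bool) :
    nodes.foldl (scanNodeB region_name ars placed) (s, F, b)
      = (nodes.foldl (candNodeB placed) s,
         F ++ nodes.flatMap (contribNode region_name placed),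
         b && nodes.all (nodeOkB region_name ars)) := by
  induction nodes generalizing s F b with
  | nil => simp
  | cons nodeL nodes ih =>
    simp only [List.foldl_cons, List.flatMap_cons, List.all_cons]
    rw [show scanNodeB region_name ars placed (s, F, b) nodeL
        = ((candNodeB placed s nodeL),
           F ++ contribNode region_name placed nodeL,
           b && nodeOkB region_name ars nodeL) from ?_]
    · rw [ih]
      simp [List.append_assoc, Bool.and_assoc]
    · unfold scanNodeB
      rw [scan_inner_spec]
      unfold candNodeB contribNode nodeOkB
      simp only [Prod.mk.injEq]
      refine ⟨trivial, trivial, ?_⟩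
      by_cases h : (decide (alignUpB ((PySem.Dict.ofList nodeL).getD region_name 0) > 0) &&
          decide (alignUpB ((PySem.Dict.ofList nodeL).getD region_name 0) > ars)) = true <;>
        simp [h]

-- per-node: A's validity test = feasibility bit && interval avoidance ----------
theorem items_all_eq (c own : Int) (node : PySem.Dict String Int)
    (items : List (String × Int)) :
    (items.all (fun p =>
      let psize := alignUpB (node.getD p.1 0)
      if psize ≤ 0 then true
      else !(decide (c < p.2 + psize) && decide (p.2 < c + own))))
    = (contribItems own node items).all (okAtB c) := by
  induction items with
  | nil => rfl
  | cons p items ih =>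
    simp only [List.all_cons, contribItems, List.filterMap_cons]
    by_cases hp : alignUpB (node.getD p.1 0) > 0
    · have hple : ¬ alignUpB (node.getD p.1 0) ≤ 0 := by omega
      simp only [hp, if_true, hple, if_false, List.all_cons]
      rw [show (contribItems own node items) = items.filterMap (fun p =>
        if alignUpB (node.getD p.1 0) > 0 then some (p.2 - own, p.2 + alignUpB (node.getD p.1 0))
        else none) from rfl] at ih
      rw [← ih]
      congr 1
      have : (!(decide (c < p.2 + alignUpB (node.getD p.1 0)) && decide (p.2 < c + own)))
          = okAtB c (p.2 - own, p.2 + alignUpB (node.getD p.1 0)) := by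
        by_cases h1 : c < p.2 + alignUpB (node.getD p.1 0) <;>
          by_cases h2 : p.2 < c + own <;>
          simp [okAtB, h1, h2] <;> omega

      exact this
    · have hple : alignUpB (node.getD p.1 0) ≤ 0 := by omega
      simp only [hp, if_false, hple, if_true, Bool.true_and]
      exact ih

theorem node_valid_eq (region_name : String) (c ars : Int) (placed : PySem.Dict String Int)
    (nodeL : List (String × Int)) :
    nodeValidA region_name c ars placed nodeL
      = (nodeOkB region_name ars nodeL
          && (contribNode region_name placed nodeL).all (okAtB c)) := by
  unfold nodeValidA nodeOkB contribNode
  simp only [align_eq]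
  by_cases h : alignUpB ((PySem.Dict.ofList nodeL).getD region_name 0) ≤ 0
  · have h2 : ¬ alignUpB ((PySem.Dict.ofList nodeL).getD region_name 0) > 0 := by omega
    simp [h, h2]
  · have hpos : alignUpB ((PySem.Dict.ofList nodeL).getD region_name 0) > 0 := by omega
    simp only [h, if_false, hpos, if_true, decide_true, Bool.true_and]
    rw [items_all_eq c (alignUpB ((PySem.Dict.ofList nodeL).getD region_name 0))
      (PySem.Dict.ofList nodeL) placed.items]
    rw [Bool.and_comm]
    congr 1
    by_cases hgt : alignUpB ((PySem.Dict.ofList nodeL).getD region_name 0) > ars <;>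
      simp [hgt]

theorem valid_eq (region_name : String) (c ars : Int) (placed : PySem.Dict String Int)
    (nodes : List (List (String × Int))) :
    regionOffsetIsValid region_name c ars placed nodes
      = (nodes.all (nodeOkB region_name ars)
          && (nodes.flatMap (contribNode region_name placed)).all (okAtB c)) := by
  have hall : ∀ ns : List (List (String × Int)),
      ns.all (nodeValidA region_name c ars placed)
        = (ns.all (nodeOkB region_name ars)
            && (ns.flatMap (contribNode region_name placed)).all (okAtB c)) := by
    intro ns
    induction ns with
    | nil => rfl
    | cons nodeL ns ih =>
      simp only [List.all_cons, List.flatMap_cons, List.all_append, node_valid_eq, ih]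
      cases nodeOkB region_name ars nodeL <;>
        cases (contribNode region_name placed nodeL).all (okAtB c) <;> simp
  unfold regionOffsetIsValid
  by_cases h : nodes = []
  · simp [h]
  · simp only [h, if_false, hall]

-- merging preserves the covered points ----------------------------------------
theorem mergeLoop_inside (x : Int) : ∀ (rest : List (Int × Int)) (lo hi : Int),
    (∀ iv ∈ rest, lo ≤ iv.1) → rest.Pairwise (fun a b => a.1 ≤ b.1) →
    ((∃ iv ∈ mergeLoopB lo hi rest, iv.1 < x ∧ x < iv.2)
      ↔ ((lo < x ∧ x < hi) ∨ ∃ iv ∈ rest, iv.1 < x ∧ x < iv.2)) := by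
  intro rest
  induction rest with
  | nil => intro lo hi _ _; simp [mergeLoopB]
  | cons niv rest ih =>
    intro lo hi hle hsort
    obtain ⟨nlo, nhi⟩ := niv
    have hlo_n : lo ≤ nlo := hle (nlo, nhi) (by simp)
    have hle' : ∀ iv ∈ rest, nlo ≤ iv.1 := fun iv hiv => (List.pairwise_cons.mp hsort).1 iv hiv
    have hsort' : rest.Pairwise (fun a b => a.1 ≤ b.1) := (List.pairwise_cons.mp hsort).2
    rw [mergeLoopB]
    by_cases hovl : nlo < hi
    · rw [if_pos hovl]
      rw [ih lo (max hi nhi) (fun iv hiv => le_trans hlo_n (hle' iv hiv)) hsort']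
      have key : (lo < x ∧ x < max hi nhi) ↔ ((lo < x ∧ x < hi) ∨ (nlo < x ∧ x < nhi)) := by
        constructor
        · rintro ⟨h1, h2⟩
          by_cases h : x < hi
          · exact Or.inl ⟨h1, h⟩
          · exact Or.inr ⟨by omega, by omega⟩
        · rintro (⟨h1, h2⟩ | ⟨h1, h2⟩) <;> constructor <;> omega
      rw [key, or_assoc]
      constructor
      · rintro (h | h)
        · exact Or.inl h
        · refine Or.inr ?_
          rcases h with (h | ⟨iv, hiv, hx⟩)
          · exact ⟨(nlo, nhi), by simp, h⟩
          · exact ⟨iv, by simp [hiv], hx⟩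
      · rintro (h | ⟨iv, hiv, hx⟩)
        · exact Or.inl h
        · rcases List.mem_cons.mp hiv with h | h
          · subst h; exact Or.inr (Or.inl hx)
          · exact Or.inr (Or.inr ⟨iv, h, hx⟩)
    · rw [if_neg hovl]
      have lhs : (∃ iv ∈ (lo, hi) :: mergeLoopB nlo nhi rest, iv.1 < x ∧ x < iv.2)
          ↔ ((lo < x ∧ x < hi) ∨ ∃ iv ∈ mergeLoopB nlo nhi rest, iv.1 < x ∧ x < iv.2) := by
        constructor
        · rintro ⟨iv, hiv, hx⟩
          rcases List.mem_cons.mp hiv with h | h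
          · subst h; exact Or.inl hx
          · exact Or.inr ⟨iv, h, hx⟩
        · rintro (h | ⟨iv, hiv, hx⟩)
          · exact ⟨(lo, hi), by simp, h⟩
          · exact ⟨iv, by simp [hiv], hx⟩
      rw [lhs, ih nlo nhi hle' hsort']
      constructor
      · rintro (h | (h | ⟨iv, hiv, hx⟩))
        · exact Or.inl h
        · exact Or.inr ⟨(nlo, nhi), by simp, h⟩
        · exact Or.inr ⟨iv, by simp [hiv], hx⟩
      · rintro (h | ⟨iv, hiv, hx⟩)
        · exact Or.inl h
        · rcases List.mem_cons.mp hiv with h | h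
          · subst h; exact Or.inr (Or.inl hx)
          · exact Or.inr (Or.inr ⟨iv, h, hx⟩)

theorem mergeLoop_sorted : ∀ (rest : List (Int × Int)) (lo hi : Int),
    (∀ iv ∈ rest, lo ≤ iv.1) → rest.Pairwise (fun a b => a.1 ≤ b.1) →
    ((mergeLoopB lo hi rest).Pairwise (fun a b => a.1 ≤ b.1)
      ∧ ∀ iv ∈ mergeLoopB lo hi rest, lo ≤ iv.1) := by
  intro rest
  induction rest with
  | nil =>
    intro lo hi _ _
    refine ⟨by simp [mergeLoopB], ?_⟩
    intro iv hiv
    simp only [mergeLoopB, List.mem_singleton] at hiv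
    simp [hiv]
  | cons niv rest ih =>
    intro lo hi hle hsort
    obtain ⟨nlo, nhi⟩ := niv
    have hlo_n : lo ≤ nlo := hle (nlo, nhi) (by simp)
    have hle' : ∀ iv ∈ rest, nlo ≤ iv.1 := fun iv hiv => (List.pairwise_cons.mp hsort).1 iv hiv
    have hsort' : rest.Pairwise (fun a b => a.1 ≤ b.1) := (List.pairwise_cons.mp hsort).2
    rw [mergeLoopB]
    by_cases hovl : nlo < hi
    · rw [if_pos hovl]
      exact ih lo (max hi nhi) (fun iv hiv => le_trans hlo_n (hle' iv hiv)) hsort'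
    · rw [if_neg hovl]
      obtain ⟨hp, hmem⟩ := ih nlo nhi hle' hsort'
      refine ⟨List.pairwise_cons.mpr ⟨fun iv hiv => le_trans hlo_n (hmem iv hiv), hp⟩, ?_⟩
      intro iv hiv
      rcases List.mem_cons.mp hiv with h | h
      · simp [h]
      · exact le_trans hlo_n (hmem iv h)

theorem mergeIntervals_sorted (l : List (Int × Int)) (h : l.Pairwise (fun a b => a.1 ≤ b.1)) :
    (mergeIntervalsB l).Pairwise (fun a b => a.1 ≤ b.1) := by
  cases l with
  | nil => simp [mergeIntervalsB]
  | cons iv rest =>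
    obtain ⟨lo, hi⟩ := iv
    rw [mergeIntervalsB]
    exact (mergeLoop_sorted rest lo hi (fun iv hiv => (List.pairwise_cons.mp h).1 iv hiv)
      (List.pairwise_cons.mp h).2).1

theorem all_okAt_iff (c : Int) (l : List (Int × Int)) :
    l.all (okAtB c) = true ↔ ¬ ∃ iv ∈ l, iv.1 < c ∧ c < iv.2 := by
  rw [List.all_eq_true]
  constructor
  · rintro h ⟨iv, hiv, h1, h2⟩
    have := h iv hiv
    simp [okAtB] at this
    omega
  · intro h iv hiv
    simp only [okAtB, Bool.or_eq_true, decide_eq_true_eq]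
    by_cases h1 : c ≤ iv.1
    · exact Or.inl h1
    · by_cases h2 : iv.2 ≤ c
      · exact Or.inr h2
      · exact absurd ⟨iv, hiv, by omega, by omega⟩ h

theorem merged_all_eq (c : Int) (F : List (Int × Int)) :
    (mergeIntervalsB (PySem.List.sorted F (fun iv => iv.1) false)).all (okAtB c)
      = F.all (okAtB c) := by
  have hs : (PySem.List.sorted F (fun iv : Int × Int => iv.1) false).Pairwise
      (fun a b => a.1 ≤ b.1) := PySem.List.sorted_pairwise F (fun iv => iv.1)
  have hperm : (PySem.List.sorted F (fun iv : Int × Int => iv.1) false).Perm F :=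
    PySem.List.sorted_perm F (fun iv => iv.1) false
  rcases hsf : PySem.List.sorted F (fun iv : Int × Int => iv.1) false with _ | ⟨⟨lo, hi⟩, rest⟩
  · have hF : F = [] := by rw [← PySem.List.sorted_eq_nil_iff (key := fun iv : Int × Int => iv.1) (rev := false)]; exact hsf
    rw [hsf] at hperm
    rw [hF]
    rfl
  · rw [hsf] at hs hperm
    rw [mergeIntervalsB]
    have hle : ∀ iv ∈ rest, lo ≤ iv.1 := fun iv hiv => (List.pairwise_cons.mp hs).1 iv hiv
    have hsort' : rest.Pairwise (fun a b => a.1 ≤ b.1) := (List.pairwise_cons.mp hs).2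
    have hiff : (∃ iv ∈ mergeLoopB lo hi rest, iv.1 < c ∧ c < iv.2)
        ↔ (∃ iv ∈ F, iv.1 < c ∧ c < iv.2) := by
      rw [mergeLoop_inside c rest lo hi hle hsort']
      constructor
      · rintro (h | ⟨iv, hiv, hx⟩)
        · exact ⟨(lo, hi), hperm.subset (by simp), h⟩
        · exact ⟨iv, hperm.subset (by simp [hiv]), hx⟩
      · rintro ⟨iv, hiv, hx⟩
        have hmem : iv ∈ (lo, hi) :: rest := hperm.mem_iff.mpr hiv
        rcases List.mem_cons.mp hmem with h | h
        · subst h; exact Or.inl hx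
        · exact Or.inr ⟨iv, h, hx⟩
    by_cases hb : ∃ iv ∈ F, iv.1 < c ∧ c < iv.2
    · have l1 : (mergeLoopB lo hi rest).all (okAtB c) = false := by
        rw [← Bool.not_eq_true, all_okAt_iff]
        simpa using hiff.mpr hb
      have l2 : F.all (okAtB c) = false := by
        rw [← Bool.not_eq_true, all_okAt_iff]
        simpa using hb
      rw [l1, l2]
    · have l1 : (mergeLoopB lo hi rest).all (okAtB c) = true :=
        (all_okAt_iff c _).mpr (fun h => hb (hiff.mp h))
      have l2 : F.all (okAtB c) = true := (all_okAt_iff c F).mpr hb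
      rw [l1, l2]

-- the sweep is the reference scan ----------------------------------------------
theorem firstGood_drop (lo hi : Int) (ms : List (Int × Int)) (cands : List Int)
    (h : ∀ c ∈ cands, hi ≤ c) :
    firstGoodB ((lo, hi) :: ms) cands = firstGoodB ms cands := by
  induction cands with
  | nil => rfl
  | cons c cs ih =>
    rw [firstGoodB, firstGoodB]
    have hc : okAtB c (lo, hi) = true := by
      simp only [okAtB, Bool.or_eq_true, decide_eq_true_eq]
      exact Or.inr (h c (by simp))
    simp only [List.all_cons, hc, Bool.true_and]
    split
    · rfl
    · exact ih (fun c' hc' => h c' (by simp [hc']))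

theorem sweep_eq_aux (n : Nat) : ∀ (cands : List Int) (merged : List (Int × Int)),
    cands.length + merged.length ≤ n →
    cands.Pairwise (· ≤ ·) → merged.Pairwise (fun a b => a.1 ≤ b.1) →
    sweepB cands merged = firstGoodB merged cands := by
  induction n with
  | zero =>
    intro cands merged hlen _ _
    have h1 : cands = [] := by
      cases cands with
      | nil => rfl
      | cons c cs => simp at hlen
    subst h1
    simp [sweepB, firstGoodB]
  | succ n ih =>
    intro cands merged hlen h1 h2
    rcases cands with _ | ⟨c, cs⟩
    · simp [sweepB, firstGoodB]
    rcases merged with _ | ⟨⟨lo, hi⟩, ms⟩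
    · simp [sweepB, firstGoodB]
    rw [sweepB]
    by_cases hd : hi ≤ c
    · rw [if_pos hd]
      rw [ih (c :: cs) ms (by simp at hlen ⊢; omega) h1 (List.pairwise_cons.mp h2).2]
      refine (firstGood_drop lo hi ms (c :: cs) ?_).symm
      intro c' hc'
      rcases List.mem_cons.mp hc' with h | h
      · subst h; exact hd
      · exact le_trans hd ((List.pairwise_cons.mp h1).1 c' h)
    · rw [if_neg hd]
      by_cases hok : c ≤ lo
      · rw [if_pos hok, firstGoodB]
        have hall : ((lo, hi) :: ms).all (okAtB c) = true := by
          rw [List.all_eq_true]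
          intro iv hiv
          rcases List.mem_cons.mp hiv with h | h
          · subst h
            simp only [okAtB, Bool.or_eq_true, decide_eq_true_eq]
            exact Or.inl hok
          · simp only [okAtB, Bool.or_eq_true, decide_eq_true_eq]
            exact Or.inl (le_trans hok ((List.pairwise_cons.mp h2).1 iv h))
        rw [hall]
        rfl
      · rw [if_neg hok]
        rw [ih cs ((lo, hi) :: ms) (by simp at hlen ⊢; omega)
          (List.pairwise_cons.mp h1).2 h2]
        rw [firstGoodB]
        have hall : ((lo, hi) :: ms).all (okAtB c) = false := by
          simp only [List.all_cons, Bool.and_eq_false_iff]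
          left
          simp only [okAtB, Bool.or_eq_false_iff, decide_eq_false_iff_not]
          exact ⟨hok, hd⟩
        rw [hall]
        simp

theorem firstGood_congr (F G : List (Int × Int))
    (h : ∀ c, F.all (okAtB c) = G.all (okAtB c)) :
    ∀ l, firstGoodB F l = firstGoodB G l := by
  intro l
  induction l with
  | nil => rfl
  | cons c cs ih =>
    rw [firstGoodB, firstGoodB, h c]
    split <;> simp [ih]

-- A's candidate loop vs the reference scan --------------------------------------
theorem firstValidA_eq_firstGood (region_name : String) (ars : Int)
    (placed : PySem.Dict String Int) (nodes : List (List (String × Int)))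
    (F : List (Int × Int))
    (h : ∀ c, regionOffsetIsValid region_name c ars placed nodes = F.all (okAtB c)) :
    ∀ l, firstValidA region_name ars placed nodes l = firstGoodB F l := by
  intro l
  induction l with
  | nil => rfl
  | cons c cs ih =>
    rw [firstValidA, firstGoodB, h c]
    split <;> simp [ih]

theorem firstValidA_none (region_name : String) (ars : Int)
    (placed : PySem.Dict String Int) (nodes : List (List (String × Int)))
    (h : ∀ c, regionOffsetIsValid region_name c ars placed nodes = false) :
    ∀ l, firstValidA region_name ars placed nodes l = none := by
  intro l
  induction l with
  | nil => rfl
  | cons c cs ih => rw [firstValidA, h c]; simp [ih]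

-- head of sorted(set(L)) is min(L) ----------------------------------------------
theorem head_sorted_set_min (L : List Int) (hL : L ≠ []) :
    ∃ m t, PySem.List.sorted (PySem.Set.ofList L) (fun x => x) false = m :: t ∧
           PySem.List.min? L (fun x => x) = some m := by
  have hne : PySem.Set.ofList L ≠ [] := by
    obtain ⟨x, hx⟩ := List.exists_mem_of_ne_nil L hL
    have hx2 : x ∈ PySem.Set.ofList L := by rw [PySem.Set.mem_ofList]; exact hx
    exact List.ne_nil_of_mem hx2
  have hsne : PySem.List.sorted (PySem.Set.ofList L) (fun x => x) false ≠ [] := by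
    rw [Ne, PySem.List.sorted_eq_nil_iff]
    exact hne
  obtain ⟨m, t, hs⟩ := List.exists_cons_of_ne_nil hsne
  rcases hmn : PySem.List.min? L (fun x => x) with _ | mn
  · rw [PySem.List.min?_eq_none_iff] at hmn
    exact absurd hmn hL
  · have h1 : ∀ y ∈ PySem.Set.ofList L, m ≤ y := fun y hy => by
      simpa using PySem.List.key_head_sorted_le _ _ hs y hy
    have h2 : ∀ y ∈ L, mn ≤ y := fun y hy => by
      simpa using PySem.List.min?_isMin hmn y hy
    have hmem : m ∈ L := by
      have hmem1 : m ∈ PySem.List.sorted (PySem.Set.ofList L) (fun x => x) false := by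
        rw [hs]; simp
      rw [PySem.List.mem_sorted, PySem.Set.mem_ofList] at hmem1
      exact hmem1
    have hmn_mem : mn ∈ L := PySem.List.min?_mem hmn
    have hmn_mem2 : mn ∈ PySem.Set.ofList L := by rw [PySem.Set.mem_ofList]; exact hmn_mem
    have heq : m = mn := le_antisymm (h1 mn hmn_mem2) (h2 m hmem)
    exact ⟨m, t, hs, by rw [heq]⟩

-- ===== VERDICT (by name: the statement is the Claim_ definition above) =====
theorem find_region_offset_py_spec : Claim_equal_find_region_offset_py := by
  unfold Claim_equal_find_region_offset_py
  intro region_name aligned_region_size placed_region_offsets per_node_region_sizes _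
  unfold Spec_find_region_offset_py
  by_cases hn : per_node_region_sizes = []
  · subst hn
    simp only [find_region_offset_py, find_region_offset_py_alt, reduceIte]
    set placed := PySem.Dict.ofList placed_region_offsets with hplaced
    have hfold : placed.values.foldl (fun s v => PySem.Set.add s v) (PySem.Set.ofList [0])
        = PySem.Set.ofList (0 :: placed.values) := by
      rw [show (0 :: placed.values) = [0] ++ placed.values from rfl, PySem.Set.ofList_append]
      rfl
    rw [hfold]
    obtain ⟨m, t, hs, hmin⟩ := head_sorted_set_min (0 :: placed.values) (by simp)
    rw [hs, hmin]
    rw [firstValidA]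
    rw [show regionOffsetIsValid region_name m aligned_region_size placed [] = true from by
      simp [regionOffsetIsValid]]
    simp
  · simp only [find_region_offset_py, find_region_offset_py_alt, if_neg hn]
    set placed := PySem.Dict.ofList placed_region_offsets with hplaced
    rw [scan_spec]
    simp only []
    rw [candNodeA_eq placed]
    simp only [List.nil_append, Bool.true_and]
    set F := per_node_region_sizes.flatMap (contribNode region_name placed) with hF
    by_cases hf : per_node_region_sizes.all (nodeOkB region_name aligned_region_size) = true
    · rw [hf]
      have hpred : ∀ c, regionOffsetIsValid region_name c aligned_region_size placed
          per_node_region_sizes = F.all (okAtB c) := by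
        intro c
        rw [valid_eq, hf, Bool.true_and]
      rw [firstValidA_eq_firstGood region_name aligned_region_size placed
        per_node_region_sizes F hpred]
      rw [if_pos rfl]
      have hpC : (PySem.List.sorted (per_node_region_sizes.foldl (candNodeB placed)
          (PySem.Set.ofList [0])) (fun x => x) false).Pairwise (fun a b => a ≤ b) :=
        PySem.List.sorted_pairwise _ (fun x => x)
      have hpF : (mergeIntervalsB (PySem.List.sorted F (fun iv : Int × Int => iv.1)
          false)).Pairwise (fun a b => a.1 ≤ b.1) :=
        mergeIntervals_sorted _ (PySem.List.sorted_pairwise F (fun iv => iv.1))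
      rw [sweep_eq_aux ((PySem.List.sorted (per_node_region_sizes.foldl (candNodeB placed)
          (PySem.Set.ofList [0])) (fun x => x) false).length
          + (mergeIntervalsB (PySem.List.sorted F (fun iv : Int × Int => iv.1) false)).length)
        _ _ le_rfl hpC hpF]
      rw [firstGood_congr (mergeIntervalsB (PySem.List.sorted F (fun iv : Int × Int => iv.1)
        false)) F (fun c => merged_all_eq c F)]
      have hveq : (placed.values = []) = (placed.items = []) := by
        simp [PySem.Dict.values, List.map_eq_nil_iff]
      cases hres : firstGoodB F (PySem.List.sorted (per_node_region_sizes.foldl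
          (candNodeB placed) (PySem.Set.ofList [0])) (fun x => x) false) with
      | some c => rfl
      | none => simp only [hveq]
    · have hf' : per_node_region_sizes.all (nodeOkB region_name aligned_region_size) = false :=
        by simpa using hf
      rw [hf']
      have hpred : ∀ c, regionOffsetIsValid region_name c aligned_region_size placed
          per_node_region_sizes = false := by
        intro c
        rw [valid_eq, hf', Bool.false_and]
      rw [firstValidA_none region_name aligned_region_size placed per_node_region_sizes hpred]
      have hveq : (placed.values = []) = (placed.items = []) := by
        simp [PySem.Dict.values, List.map_eq_nil_iff]
      simp [Bool.false_eq_true, hveq]
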